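-- pv_equiv track=rewrite | github.com/wiren/adventofcode | 2020/day11.py | neighs
-- ===== SOURCE A (Python) =====
-- def add(a, b):
--     return [a[0] + b[0], a[1] + b[1]]
--
-- def inside(m, pos):
--     return 0 <= pos[0] < len(m) and 0 <= pos[1] < len(m[0])
--
-- def neighs(m, pos, d):
--     res = []
--     curr = pos
--     while True:
--         curr = add(curr, d)
--         if inside(m, curr):
--             res.append(curr)
--             w = m[curr[0]][curr[1]]
--             if w in['L', '#']:
--                 break
--         else:
--             break
--     return res
-- ===== SOURCE B (Python) =====
-- def _axis_limit(p, size, step):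
--     # number of consecutive steps k = 1, 2, ... keeping p + k*step in [0, size);
--     # None means this axis imposes no bound
--     if step > 0:
--         return (size - 1 - p) // step if p + step >= 0 else 0
--     if step < 0:
--         return p // (-step) if p + step <= size - 1 else 0
--     return None if 0 <= p < size else 0
--
-- def _upto(m, ray):
--     # prefix of ray up to (and including) the first seat, or all of it
--     if not ray:
--         return []
--     p, rest = ray[0], ray[1:]
--     if m[p[0]][p[1]] in ('L', '#'):
--         return [p]
--     return [p] + _upto(m, rest)
--
-- def neighs(m, pos, d):
--     if not m:
--         return []
--     R, C = len(m), len(m[0])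
--     r, c, dr, dc = pos[0], pos[1], d[0], d[1]
--     lims = [x for x in (_axis_limit(r, R, dr), _axis_limit(c, C, dc)) if x is not None]
--     n = max(0, min(lims)) if lims else 0
--     ray = [[r + k * dr, c + k * dc] for k in range(1, n + 1)]
--     return _upto(m, ray)
-- ===== Notes on version B (the rewrite author's own statement) =====
-- stated objective: alternative
-- what changed: B replaces A's step-by-step while-loop with an inside() bounds test at every step by a closed-form computation (per-axis integer division) of how many consecutive steps stay inside the grid, builds that ray as a comprehension, and then only scans it for the first seat.
-- outside the precondition, e.g. on neighs([['L']], [0, 0], [0, 0]): A returns [[0, 0]], B returns []; on neighs([['.', '.'], ['.']], [0, 0], [0, 1]): A returns [[0, 1]], B returns [[0, 1]]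
import Mathlib
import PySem

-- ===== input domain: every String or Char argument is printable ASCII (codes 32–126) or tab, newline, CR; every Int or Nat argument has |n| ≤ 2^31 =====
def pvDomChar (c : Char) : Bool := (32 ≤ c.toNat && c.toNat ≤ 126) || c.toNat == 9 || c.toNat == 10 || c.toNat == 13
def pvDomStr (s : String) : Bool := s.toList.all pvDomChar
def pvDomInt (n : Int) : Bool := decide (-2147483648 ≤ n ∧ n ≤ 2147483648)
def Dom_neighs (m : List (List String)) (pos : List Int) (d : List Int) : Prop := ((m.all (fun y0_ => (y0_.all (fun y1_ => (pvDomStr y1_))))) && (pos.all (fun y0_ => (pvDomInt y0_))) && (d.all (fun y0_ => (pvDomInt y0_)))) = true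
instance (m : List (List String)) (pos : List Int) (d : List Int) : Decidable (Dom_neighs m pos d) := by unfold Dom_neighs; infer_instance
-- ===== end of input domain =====

-- B replaces A's step-by-step walk (a bounds test per step) with a closed-form per-axis count
-- of the steps that stay inside the grid, builds the whole ray at once and truncates it at the
-- first seat; same return value on Pre_ (objective: alternative).

-- ===== PORT A =====
def pvAdd (a b : List Int) : List Int :=
  [(PySem.List.pyGet? a 0).getD 0 + (PySem.List.pyGet? b 0).getD 0,
   (PySem.List.pyGet? a 1).getD 0 + (PySem.List.pyGet? b 1).getD 0]

def pvInside (m : List (List String)) (p : List Int) : Bool :=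
  (decide (0 ≤ (PySem.List.pyGet? p 0).getD 0) && decide ((PySem.List.pyGet? p 0).getD 0 < (m.length : Int))) &&
  (decide (0 ≤ (PySem.List.pyGet? p 1).getD 0) && decide ((PySem.List.pyGet? p 1).getD 0 < (((PySem.List.pyGet? m 0).getD []).length : Int)))

-- m[p[0]][p[1]] (the defaults only fire outside Pre_, where Python raises)
def pvCell (m : List (List String)) (p : List Int) : String :=
  (PySem.List.pyGet? ((PySem.List.pyGet? m ((PySem.List.pyGet? p 0).getD 0)).getD []) ((PySem.List.pyGet? p 1).getD 0)).getD ""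

-- the 'while True' loop; the fuel bounds the iterations and is proved sufficient inside Pre_
def pvLoop (m : List (List String)) (d : List Int) (curr : List Int) (res : List (List Int)) : Nat → List (List Int)
  | 0 => res
  | fuel + 1 =>
    let curr' := pvAdd curr d
    if pvInside m curr' then
      let res' := res ++ [curr']
      if pvCell m curr' = "L" ∨ pvCell m curr' = "#" then res'
      else pvLoop m d curr' res' fuel
    else res

def neighs (m : List (List String)) (pos : List Int) (d : List Int) : List (List Int) :=
  pvLoop m d pos [] (m.length + ((PySem.List.pyGet? m 0).getD []).length + 2)

-- ===== PORT B =====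
def pvAxisLimit (p size step : Int) : Option Int :=
  if step > 0 then some (if p + step ≥ 0 then PySem.Int.floordiv (size - 1 - p) step else 0)
  else if step < 0 then some (if p + step ≤ size - 1 then PySem.Int.floordiv p (-step) else 0)
  else if 0 ≤ p ∧ p < size then none else some 0

def pvUpto (m : List (List String)) : List (List Int) → List (List Int)
  | [] => []
  | p :: rest =>
    if pvCell m p = "L" ∨ pvCell m p = "#" then [p]
    else p :: pvUpto m rest

def neighs_alt (m : List (List String)) (pos : List Int) (d : List Int) : List (List Int) :=
  if m = [] then []
  else
    let R : Int := m.length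
    let C : Int := ((PySem.List.pyGet? m 0).getD []).length
    let r := (PySem.List.pyGet? pos 0).getD 0
    let c := (PySem.List.pyGet? pos 1).getD 0
    let dr := (PySem.List.pyGet? d 0).getD 0
    let dc := (PySem.List.pyGet? d 1).getD 0
    let lims : List Int := (pvAxisLimit r R dr).toList ++ (pvAxisLimit c C dc).toList
    let n : Int := if lims = [] then 0 else max 0 ((PySem.List.min? lims (fun x => x)).getD 0)
    let ray := (PySem.List.pyRange 1 (n + 1) 1).map (fun k => [r + k * dr, c + k * dc])
    pvUpto m ray

-- ===== PRECONDITION & SPEC =====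
-- Pre_ excludes: pos/d with fewer than two entries and grids with a row shorter than the
-- first (A can raise IndexError there), and the degenerate direction d == [0,0] started
-- inside the grid, on which A loops forever except when the start cell itself is a seat; on
-- that unspecified degenerate corner A yields [pos] and B yields [], both defensible readings
-- of an empty ray, so the corner is excluded rather than claimed.
def Pre_neighs (m : List (List String)) (pos : List Int) (d : List Int) : Prop :=
  2 ≤ pos.length ∧ 2 ≤ d.length ∧
  (∀ row ∈ m, (m.headD []).length ≤ row.length) ∧
  ¬((PySem.List.pyGet? d 0).getD 0 = 0 ∧ (PySem.List.pyGet? d 1).getD 0 = 0 ∧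
    0 ≤ (PySem.List.pyGet? pos 0).getD 0 ∧ (PySem.List.pyGet? pos 0).getD 0 < (m.length : Int) ∧
    0 ≤ (PySem.List.pyGet? pos 1).getD 0 ∧ (PySem.List.pyGet? pos 1).getD 0 < ((m.headD []).length : Int))

instance (m : List (List String)) (pos : List Int) (d : List Int) : Decidable (Pre_neighs m pos d) := by
  unfold Pre_neighs; infer_instance

def pvWitness_neighs : List (List String) × List Int × List Int := ([[".", "L"]], [0, 0], [0, 1])

def Spec_neighs (m : List (List String)) (pos : List Int) (d : List Int) (out : List (List Int)) : Prop := out = neighs_alt m pos d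
instance (m : List (List String)) (pos : List Int) (d : List Int) (out : List (List Int)) : Decidable (Spec_neighs m pos d out) := by unfold Spec_neighs; infer_instance

-- ===== CLAIM (what is proved, stated in full; the proofs are below) =====
def Claim_equal_neighs : Prop := ∀ (m : List (List String)) (pos : List Int) (d : List Int), Dom_neighs m pos d → Pre_neighs m pos d → Spec_neighs m pos d (neighs m pos d)

-- ===== LEMMAS AND PROOFS =====

-- the position reached after k steps of the ray
def pvP (r c dr dc k : Int) : List Int := [r + k * dr, c + k * dc]

theorem pvP_get0 (r c dr dc k : Int) : (PySem.List.pyGet? (pvP r c dr dc k) 0).getD 0 = r + k * dr := by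
  simp [pvP, PySem.List.pyGet?, PySem.List.pyIdx?]

theorem pvP_get1 (r c dr dc k : Int) : (PySem.List.pyGet? (pvP r c dr dc k) 1).getD 0 = c + k * dc := by
  simp [pvP, PySem.List.pyGet?, PySem.List.pyIdx?]

theorem pvAxisLimit_inside_some {p size step L : Int} (h : pvAxisLimit p size step = some L)
    (k : Int) (hk1 : 1 ≤ k) (hkL : k ≤ L) : 0 ≤ p + k * step ∧ p + k * step < size := by
  unfold pvAxisLimit at h
  split_ifs at h with h1 hg h2 hg2 h3
  · obtain rfl := Option.some.inj h
    have hd := (PySem.Int.le_floordiv_iff_mul_le h1).mp hkL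
    constructor
    · nlinarith [mul_nonneg (by omega : (0:Int) ≤ k - 1) (le_of_lt h1)]
    · nlinarith
  · obtain rfl := Option.some.inj h
    omega
  · obtain rfl := Option.some.inj h
    have hpos : (0:Int) < -step := by omega
    have hd := (PySem.Int.le_floordiv_iff_mul_le hpos).mp hkL
    constructor
    · nlinarith
    · nlinarith [mul_nonpos_of_nonneg_of_nonpos (by omega : (0:Int) ≤ k - 1) (by omega : step ≤ 0)]
  · obtain rfl := Option.some.inj h
    omega
  · obtain rfl := Option.some.inj h
    omega

theorem pvAxisLimit_inside_none {p size step : Int} (h : pvAxisLimit p size step = none)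
    (k : Int) : 0 ≤ p + k * step ∧ p + k * step < size := by
  unfold pvAxisLimit at h
  split_ifs at h with h1 h2 h3
  · have hstep : step = 0 := by omega
    subst hstep
    simpa using h3

theorem pvAxisLimit_outside {p size step L : Int} (h : pvAxisLimit p size step = some L) :
    ¬(0 ≤ p + (max 0 L + 1) * step ∧ p + (max 0 L + 1) * step < size) := by
  have hK : L < max 0 L + 1 := by omega
  unfold pvAxisLimit at h
  split_ifs at h with h1 hg h2 hg2 h3
  · obtain rfl := Option.some.inj h
    have hlt := (PySem.Int.floordiv_lt_iff_lt_mul h1).mp hK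
    rintro ⟨-, hc⟩
    nlinarith
  · obtain rfl := Option.some.inj h
    rintro ⟨hc, -⟩
    simp only [max_self, zero_add, one_mul] at hc
    omega
  · obtain rfl := Option.some.inj h
    have hpos : (0:Int) < -step := by omega
    have hlt := (PySem.Int.floordiv_lt_iff_lt_mul hpos).mp hK
    rintro ⟨hc, -⟩
    nlinarith
  · obtain rfl := Option.some.inj h
    rintro ⟨-, hc⟩
    simp only [max_self, zero_add, one_mul] at hc
    omega
  · obtain rfl := Option.some.inj h
    have hstep : step = 0 := by omega
    subst hstep
    rintro ⟨hc1, hc2⟩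
    simp only [mul_zero, add_zero] at hc1 hc2
    exact h3 ⟨hc1, hc2⟩

theorem pvAxisLimit_le_size {p size step L : Int} (h : pvAxisLimit p size step = some L)
    (hs : 0 ≤ size) : L ≤ size := by
  unfold pvAxisLimit at h
  split_ifs at h with h1 hg h2 hg2 h3
  · obtain rfl := Option.some.inj h
    set F := PySem.Int.floordiv (size - 1 - p) step with hF
    by_cases hL0 : F ≤ 0
    · omega
    · have hd := (PySem.Int.le_floordiv_iff_mul_le h1).mp (le_refl F)
      nlinarith [mul_le_mul_of_nonneg_left (by omega : (1:Int) ≤ step) (by omega : (0:Int) ≤ F - 1)]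
  · obtain rfl := Option.some.inj h; omega
  · obtain rfl := Option.some.inj h
    have hpos : (0:Int) < -step := by omega
    set F := PySem.Int.floordiv p (-step) with hF
    by_cases hL0 : F ≤ 0
    · omega
    · have hd := (PySem.Int.le_floordiv_iff_mul_le hpos).mp (le_refl F)
      nlinarith [mul_le_mul_of_nonneg_left (by omega : (1:Int) ≤ -step) (by omega : (0:Int) ≤ F - 1)]
  · obtain rfl := Option.some.inj h; omega
  · obtain rfl := Option.some.inj h; omega

-- the loop, started j steps along the ray, appends the seat-truncated rest of the ray
theorem pvLoop_eq (m : List (List String)) (d : List Int) (r c dr dc : Int)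
    (hd0 : (PySem.List.pyGet? d 0).getD 0 = dr) (hd1 : (PySem.List.pyGet? d 1).getD 0 = dc)
    (N : Nat)
    (hin : ∀ k : Int, 1 ≤ k → k ≤ (N : Int) → pvInside m (pvP r c dr dc k) = true)
    (hout : pvInside m (pvP r c dr dc ((N : Int) + 1)) = false) :
    ∀ (fuel j : Nat) (res : List (List Int)) (curr : List Int),
      (PySem.List.pyGet? curr 0).getD 0 = r + (j : Int) * dr →
      (PySem.List.pyGet? curr 1).getD 0 = c + (j : Int) * dc →
      j ≤ N → N + 1 - j ≤ fuel →
      pvLoop m d curr res fuel =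
        res ++ pvUpto m ((List.range' (j + 1) (N - j)).map (fun k : Nat => pvP r c dr dc (k : Int))) := by
  intro fuel
  induction fuel with
  | zero => intro j res curr _ _ hjN hfuel; omega
  | succ f ih =>
    intro j res curr hc0 hc1 hjN hfuel
    have e1 : r + (j : Int) * dr + dr = r + ((j : Int) + 1) * dr := by ring
    have e2 : c + (j : Int) * dc + dc = c + ((j : Int) + 1) * dc := by ring
    have hcurr' : pvAdd curr d = pvP r c dr dc ((j : Int) + 1) := by
      simp only [pvAdd, pvP, hc0, hc1, hd0, hd1, e1, e2]
    have hcast : ((j + 1 : Nat) : Int) = (j : Int) + 1 := by push_cast; ring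
    simp only [pvLoop, hcurr']
    by_cases hj : j = N
    · subst hj
      rw [if_neg (by simp [hout])]
      simp [pvUpto]
    · have hj' : j < N := lt_of_le_of_ne hjN hj
      have hinside : pvInside m (pvP r c dr dc ((j : Int) + 1)) = true := by
        apply hin <;> omega
      rw [if_pos hinside]
      have hsplit : N - j = (N - (j + 1)) + 1 := by omega
      rw [hsplit, List.range'_succ, List.map_cons, hcast, pvUpto]
      by_cases hseat : pvCell m (pvP r c dr dc ((j : Int) + 1)) = "L" ∨ pvCell m (pvP r c dr dc ((j : Int) + 1)) = "#"
      · rw [if_pos hseat, if_pos hseat]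
      · rw [if_neg hseat, if_neg hseat]
        rw [ih (j + 1) (res ++ [pvP r c dr dc ((j : Int) + 1)]) (pvP r c dr dc ((j : Int) + 1))
          (by rw [pvP_get0, hcast]) (by rw [pvP_get1, hcast])
          (by omega) (by omega)]
        simp [List.append_assoc]

theorem neighs_spec' : ∀ (m : List (List String)) (pos : List Int) (d : List Int),
    Pre_neighs m pos d → neighs m pos d = neighs_alt m pos d := by
  intro m pos d hpre
  obtain ⟨hp2, hd2, hrect, hdeg⟩ := hpre
  cases m with
  | nil =>
    have hins : ∀ p : List Int, pvInside [] p = false := by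
      intro p
      simp only [pvInside, List.length_nil, Nat.cast_zero]
      by_cases h : 0 ≤ (PySem.List.pyGet? p 0).getD 0
      · have h2 : ¬ ((PySem.List.pyGet? p 0).getD 0 < 0) := by omega
        simp [h2]
      · simp [h]
    simp [neighs, neighs_alt, pvLoop, hins, PySem.List.pyGet?, PySem.List.pyIdx?]
  | cons m0 mt =>
    have hwidth : ((PySem.List.pyGet? (m0 :: mt) 0).getD []) = m0 := by
      simp [PySem.List.pyGet?, PySem.List.pyIdx?]
    set R : Int := ((m0 :: mt).length : Int) with hR
    set C : Int := (m0.length : Int) with hC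
    set r := (PySem.List.pyGet? pos 0).getD 0 with hr
    set c := (PySem.List.pyGet? pos 1).getD 0 with hc
    set dr := (PySem.List.pyGet? d 0).getD 0 with hdr
    set dc := (PySem.List.pyGet? d 1).getD 0 with hdc
    set lims : List Int := (pvAxisLimit r R dr).toList ++ (pvAxisLimit c C dc).toList with hlims
    -- lims nonempty: both axes unbounded is exactly the Pre_-excluded degenerate input
    have hne : lims ≠ [] := by
      intro hnil
      rw [hlims] at hnil
      have h1 : pvAxisLimit r R dr = none := by
        cases h : pvAxisLimit r R dr <;> simp [h] at hnil ⊢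
      have h2 : pvAxisLimit c C dc = none := by
        cases h : pvAxisLimit c C dc <;> simp [h] at hnil ⊢
      unfold pvAxisLimit at h1 h2
      split_ifs at h1 with ha1 ha2 ha3
      split_ifs at h2 with hb1 hb2 hb3
      exact hdeg ⟨by omega, by omega, ha3.1, ha3.2, hb3.1, by simpa using hb3.2⟩
    set mn : Int := (PySem.List.min? lims (fun x => x)).getD 0 with hmn
    have hsome : PySem.List.min? lims (fun x => x) = some mn := by
      rcases hl : lims with - | ⟨x, t⟩
      · exact absurd hl hne
      · rw [hmn, hl, PySem.List.min?_id_cons]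
        rfl
    have hmem : mn ∈ lims := PySem.List.min?_mem hsome
    have hmin : ∀ x ∈ lims, (fun x => x) mn ≤ (fun x => x) x := PySem.List.min?_isMin hsome
    simp only [] at hmin
    set n : Int := max 0 mn with hn
    set N : Nat := n.toNat with hN
    have hNn : (N : Int) = n := by rw [hN]; omega
    -- the k-th ray position is inside the grid for 1 ≤ k ≤ N
    have hin : ∀ k : Int, 1 ≤ k → k ≤ (N : Int) → pvInside (m0 :: mt) (pvP r c dr dc k) = true := by
      intro k hk1 hkN
      rw [hNn, hn] at hkN
      have hkmn : k ≤ mn := by omega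
      have hrow : 0 ≤ r + k * dr ∧ r + k * dr < R := by
        cases h : pvAxisLimit r R dr with
        | none => exact pvAxisLimit_inside_none h k
        | some L =>
          refine pvAxisLimit_inside_some h k hk1 ?_
          have : L ∈ lims := by rw [hlims]; simp [h]
          exact le_trans hkmn (hmin L this)
      have hcol : 0 ≤ c + k * dc ∧ c + k * dc < C := by
        cases h : pvAxisLimit c C dc with
        | none => exact pvAxisLimit_inside_none h k
        | some L =>
          refine pvAxisLimit_inside_some h k hk1 ?_
          have : L ∈ lims := by rw [hlims]; simp [h]
          exact le_trans hkmn (hmin L this)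
      simp only [pvInside, pvP_get0, pvP_get1, hwidth]
      simp only [← hr, ← hc, ← hdr, ← hdc, ← hR, ← hC]
      simp [pvP, PySem.List.pyGet?, PySem.List.pyIdx?]
      constructor
      · constructor <;> omega
      · constructor <;> omega
    -- the (N+1)-st position is outside
    have hout : pvInside (m0 :: mt) (pvP r c dr dc ((N : Int) + 1)) = false := by
      have hNmn : (N : Int) = max 0 mn := by rw [hNn, hn]
      have houtax : mn ∈ (pvAxisLimit r R dr).toList ∨ mn ∈ (pvAxisLimit c C dc).toList := by
        rw [hlims] at hmem
        exact List.mem_append.mp hmem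
      simp only [pvInside, hwidth]
      simp [pvP, PySem.List.pyGet?, PySem.List.pyIdx?]
      cases houtax with
      | inl hx =>
        have hax : pvAxisLimit r R dr = some mn := by
          cases h : pvAxisLimit r R dr <;> simp [h] at hx <;> simp [hx]
        have := pvAxisLimit_outside hax
        rw [← hNmn] at this
        intro hc1 hc2
        exfalso
        have hRlen : R = (mt.length : Int) + 1 := by rw [hR]; push_cast [List.length_cons]; ring
        rcases not_and_or.mp this with h | h
        · exact h hc1
        · exact h (by linarith)
      | inr hx =>
        have hax : pvAxisLimit c C dc = some mn := by
          cases h : pvAxisLimit c C dc <;> simp [h] at hx <;> simp [hx]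
        have := pvAxisLimit_outside hax
        rw [← hNmn] at this
        intro hc1 hc2 hy1
        rcases not_and_or.mp this with h | h
        · exact absurd hy1 h
        · have : C ≤ c + ((N : Int) + 1) * dc := not_lt.mp h
          rw [hC] at this
          exact this
    -- the fuel used by the port of A suffices
    have hNle : (N : Int) ≤ R + C := by
      have hRpos : (0:Int) ≤ R := by rw [hR]; positivity
      have hCpos : (0:Int) ≤ C := by rw [hC]; positivity
      rw [hlims] at hmem
      rcases List.mem_append.mp hmem with hx | hx
      · have hax : pvAxisLimit r R dr = some mn := by
          cases h : pvAxisLimit r R dr <;> simp [h] at hx <;> simp [hx]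
        have := pvAxisLimit_le_size hax hRpos
        omega
      · have hax : pvAxisLimit c C dc = some mn := by
          cases h : pvAxisLimit c C dc <;> simp [h] at hx <;> simp [hx]
        have := pvAxisLimit_le_size hax hCpos
        omega
    have hA : neighs (m0 :: mt) pos d =
        pvUpto (m0 :: mt) ((List.range' 1 N).map (fun k : Nat => pvP r c dr dc (k : Int))) := by
      rw [neighs, hwidth]
      rw [pvLoop_eq (m0 :: mt) d r c dr dc hdr.symm hdc.symm N hin hout
        ((m0 :: mt).length + m0.length + 2) 0 [] pos
        (by rw [← hr]; push_cast; ring) (by rw [← hc]; push_cast; ring)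
        (by omega)
        (by
          have h1 : (((m0 :: mt).length : Int)) = R := hR.symm
          have h2 : ((m0.length : Int)) = C := hC.symm
          omega)]
      simp
    have hB : neighs_alt (m0 :: mt) pos d =
        pvUpto (m0 :: mt) ((PySem.List.pyRange 1 (n + 1) 1).map (fun k => [r + k * dr, c + k * dc])) := by
      rw [neighs_alt, if_neg (by simp : ¬ (m0 :: mt) = [])]
      simp only [hwidth, ← hr, ← hc, ← hdr, ← hdc, ← hR, ← hC, ← hlims, if_neg hne, ← hmn, ← hn]
    have hray : (PySem.List.pyRange 1 (n + 1) 1).map (fun k => [r + k * dr, c + k * dc]) =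
        (List.range' 1 N).map (fun k : Nat => pvP r c dr dc (k : Int)) := by
      rw [PySem.List.pyRange_one]
      have hcnt : ((n + 1) - 1).toNat = N := by omega
      rw [hcnt, List.range'_eq_map_range, List.map_map, List.map_map]
      apply List.map_congr_left
      intro k hk
      simp only [Function.comp, pvP]
      push_cast
      constructor <;> ring
    rw [hA, hB, hray]

-- ===== VERDICT (by name: the statement is the Claim_ definition above) =====
theorem neighs_spec : Claim_equal_neighs := by
  intro m pos d _ hpre
  exact neighs_spec' m pos d hpre
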